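-- pv_equiv track=rewrite | github.com/Soo0803/STAT4710J | labs/lab1/Exercise/lab.py | same_diff_ints
-- ===== SOURCE A (Python) =====
-- def same_diff_ints(ints):
--     #return true if the elements' value difference is similar to the indexes difference
--     if (len(ints) == 0): return False
--
--     for i in range(len(ints)):
--         for j in range(len(ints)):
--             if i == j: continue
--             if abs(i - j) == abs(ints[i] - ints[j]):
--                 return True
--
--     return False
-- ===== SOURCE B (Python) =====
-- def same_diff_ints(ints):
--     # One pass: |i-j| == |ints[i]-ints[j]| (i != j) iff ints[i]-i == ints[j]-j
--     # or ints[i]+i == ints[j]+j, i.e. a duplicate in one of those two streams.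
--     diffs = set()
--     sums = set()
--     for i, v in enumerate(ints):
--         if v - i in diffs or v + i in sums:
--             return True
--         diffs.add(v - i)
--         sums.add(v + i)
--     return False
-- ===== Notes on version B (the rewrite author's own statement) =====
-- stated objective: faster
-- what changed: Replaced the O(n^2) all-pairs scan with a single pass that detects a duplicate among the values ints[i]-i or ints[i]+i using two hash sets.
import Mathlib
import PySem

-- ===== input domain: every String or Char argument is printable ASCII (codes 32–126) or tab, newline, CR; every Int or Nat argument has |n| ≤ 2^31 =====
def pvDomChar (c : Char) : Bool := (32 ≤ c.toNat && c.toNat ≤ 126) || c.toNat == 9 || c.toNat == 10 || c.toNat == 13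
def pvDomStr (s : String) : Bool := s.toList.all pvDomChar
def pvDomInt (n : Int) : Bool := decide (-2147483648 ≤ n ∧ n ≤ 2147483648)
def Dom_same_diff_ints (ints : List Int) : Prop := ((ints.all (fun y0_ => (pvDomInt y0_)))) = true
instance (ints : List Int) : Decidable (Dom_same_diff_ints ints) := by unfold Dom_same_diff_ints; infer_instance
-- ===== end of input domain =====

-- B replaces A's all-pairs scan by a single pass with two sets (a pair with |i-j| = |ints[i]-ints[j]|
-- exists iff some value ints[i]-i or ints[i]+i repeats); objective: faster.

-- ===== PORT A =====
def same_diff_ints (ints : List Int) : Bool :=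
  if ints.length == 0 then false
  else
    (PySem.List.pyRange 0 ints.length 1).any (fun i =>
      (PySem.List.pyRange 0 ints.length 1).any (fun j =>
        if i == j then false
        else (i - j).natAbs == (PySem.List.pyGetD ints i 0 - PySem.List.pyGetD ints j 0).natAbs))

-- ===== PORT B =====
def sameDiffLoop (i : Int) (diffs sums : PySem.Set Int) : List Int → Bool
  | [] => false
  | v :: rest =>
    if PySem.Set.contains diffs (v - i) || PySem.Set.contains sums (v + i) then true
    else sameDiffLoop (i + 1) (PySem.Set.add diffs (v - i)) (PySem.Set.add sums (v + i)) rest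

def same_diff_ints_alt (ints : List Int) : Bool :=
  sameDiffLoop 0 PySem.Set.empty PySem.Set.empty ints

-- ===== PRECONDITION & SPEC =====
def Spec_same_diff_ints (ints : List Int) (out : Bool) : Prop := out = same_diff_ints_alt ints
instance (ints : List Int) (out : Bool) : Decidable (Spec_same_diff_ints ints out) := by unfold Spec_same_diff_ints; infer_instance

-- ===== CLAIM (what is proved, stated in full; the proofs are below) =====
def Claim_equal_same_diff_ints : Prop := ∀ (ints : List Int), Dom_same_diff_ints ints → Spec_same_diff_ints ints (same_diff_ints ints)

-- ===== LEMMAS AND PROOFS =====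

-- Common characterisation of both programs: some earlier index m < k agrees with k on
-- value-minus-index or value-plus-index.
def PairCond (xs : List Int) : Prop :=
  ∃ k : Nat, ∃ hk : k < xs.length, ∃ m : Nat, ∃ hm : m < k,
    (xs[m] - m = xs[k] - k ∨ xs[m] + m = xs[k] + k)

-- Invariant of B's loop: with counter i and seen-sets diffs/sums, it returns true iff some
-- position k of the remaining list hits a stored value or matches an earlier position m < k.
theorem sameDiffLoop_true_iff (xs : List Int) : ∀ (i : Int) (diffs sums : List Int),
    sameDiffLoop i diffs sums xs = true ↔
      ∃ k : Nat, ∃ hk : k < xs.length,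
        ((xs[k] - (i + k)) ∈ diffs ∨ (xs[k] + (i + k)) ∈ sums ∨
          ∃ m : Nat, ∃ hm : m < k, (xs[m] - m = xs[k] - k ∨ xs[m] + (m : Int) = xs[k] + k)) := by
  induction xs with
  | nil => simp [sameDiffLoop]
  | cons v rest ih =>
    intro i diffs sums
    rw [sameDiffLoop]
    by_cases h : (v - i) ∈ diffs ∨ (v + i) ∈ sums
    · have hc : (PySem.Set.contains diffs (v - i) || PySem.Set.contains sums (v + i)) = true := by
        simp; tauto
      rw [hc]
      simp only [if_true, true_iff]
      exact ⟨0, by simp, by simpa using h⟩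
    · have hc : (PySem.Set.contains diffs (v - i) || PySem.Set.contains sums (v + i)) = false := by
        simp; tauto
      rw [hc]
      simp only [Bool.false_eq_true, if_false]
      rw [ih]
      constructor
      · rintro ⟨k, hk, hcase⟩
        refine ⟨k + 1, by simpa using Nat.succ_lt_succ hk, ?_⟩
        simp only [List.getElem_cons_succ]
        rcases hcase with hd | hs | ⟨m, hm, heq⟩
        · rw [PySem.Set.mem_add] at hd
          rcases hd with hd | hd
          · refine Or.inl ?_
            have e : rest[k] - (i + ((k : Nat) + 1 : Nat)) = rest[k] - (i + 1 + (k : Int)) := by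
              push_cast; ring
            rw [e]; exact hd
          · refine Or.inr (Or.inr ⟨0, Nat.succ_pos k, ?_⟩)
            simp only [List.getElem_cons_zero]
            left
            push_cast at hd ⊢
            linarith
        · rw [PySem.Set.mem_add] at hs
          rcases hs with hs | hs
          · refine Or.inr (Or.inl ?_)
            have e : rest[k] + (i + ((k : Nat) + 1 : Nat)) = rest[k] + (i + 1 + (k : Int)) := by
              push_cast; ring
            rw [e]; exact hs
          · refine Or.inr (Or.inr ⟨0, Nat.succ_pos k, ?_⟩)
            simp only [List.getElem_cons_zero]
            right
            push_cast at hs ⊢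
            linarith
        · refine Or.inr (Or.inr ⟨m + 1, Nat.succ_lt_succ hm, ?_⟩)
          simp only [List.getElem_cons_succ]
          push_cast at heq ⊢
          rcases heq with h1 | h1
          · left; linarith
          · right; linarith
      · rintro ⟨k, hk, hcase⟩
        match k with
        | 0 =>
          simp only [List.getElem_cons_zero] at hcase
          rcases hcase with hd | hs | ⟨m, hm, _⟩
          · exact absurd (Or.inl (by simpa using hd)) h
          · exact absurd (Or.inr (by simpa using hs)) h
          · omega
        | k' + 1 =>
          have hk' : k' < rest.length := by simpa using Nat.lt_of_succ_lt_succ hk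
          refine ⟨k', hk', ?_⟩
          simp only [List.getElem_cons_succ] at hcase
          rcases hcase with hd | hs | ⟨m, hm, heq⟩
          · refine Or.inl ?_
            rw [PySem.Set.mem_add]
            left
            have e : rest[k'] - (i + 1 + (k' : Int)) = rest[k'] - (i + ((k' : Nat) + 1 : Nat)) := by
              push_cast; ring
            rw [e]; exact hd
          · refine Or.inr (Or.inl ?_)
            rw [PySem.Set.mem_add]
            left
            have e : rest[k'] + (i + 1 + (k' : Int)) = rest[k'] + (i + ((k' : Nat) + 1 : Nat)) := by
              push_cast; ring
            rw [e]; exact hs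
          · match m with
            | 0 =>
              simp only [List.getElem_cons_zero] at heq
              rcases heq with h1 | h1
              · refine Or.inl ?_
                rw [PySem.Set.mem_add]
                right; push_cast at h1 ⊢; linarith
              · refine Or.inr (Or.inl ?_)
                rw [PySem.Set.mem_add]
                right; push_cast at h1 ⊢; linarith
            | m' + 1 =>
              refine Or.inr (Or.inr ⟨m', Nat.lt_of_succ_lt_succ hm, ?_⟩)
              simp only [List.getElem_cons_succ] at heq
              push_cast at heq ⊢
              rcases heq with h1 | h1
              · left; linarith
              · right; linarith

theorem alt_true_iff (xs : List Int) : same_diff_ints_alt xs = true ↔ PairCond xs := by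
  unfold same_diff_ints_alt PySem.Set.empty
  rw [sameDiffLoop_true_iff]
  unfold PairCond
  simp

-- |m - k| = |a - b| (as Python's abs of ints) unfolds to the two difference/sum equations.
theorem abs_bridge (a b : Int) (m k : Nat) :
    (((m : Int) - k).natAbs = (a - b).natAbs) ↔ (a - m = b - k ∨ a + m = b + k) := by
  rw [Int.natAbs_eq_natAbs_iff]
  omega

theorem a_true_iff (xs : List Int) : same_diff_ints xs = true ↔ PairCond xs := by
  unfold same_diff_ints
  by_cases h0 : xs.length = 0
  · simp [h0, PairCond]
  · rw [if_neg (by simpa using h0)]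
    simp only [List.any_eq_true, PySem.List.mem_pyRange_one, beq_iff_eq]
    constructor
    · rintro ⟨i, ⟨hi0, hin⟩, j, ⟨hj0, hjn⟩, hcond⟩
      by_cases hij : i = j
      · simp [hij] at hcond
      · rw [if_neg (by simpa using hij)] at hcond
        have hi' : i.toNat < xs.length := by omega
        have hj' : j.toNat < xs.length := by omega
        rw [PySem.List.pyGetD_eq_getElem xs 0 hi0 (by exact_mod_cast hin),
            PySem.List.pyGetD_eq_getElem xs 0 hj0 (by exact_mod_cast hjn)] at hcond
        have hcond' := of_decide_eq_true (by exact_mod_cast hcond)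
        have hcast : ((i.toNat : Int) - (j.toNat : Int)).natAbs = (xs[i.toNat] - xs[j.toNat]).natAbs := by
          rw [Int.toNat_of_nonneg hi0, Int.toNat_of_nonneg hj0]; exact hcond'
        rw [abs_bridge] at hcast
        rcases Nat.lt_or_ge i.toNat j.toNat with hlt | hge
        · exact ⟨j.toNat, hj', i.toNat, hlt, hcast⟩
        · have hlt : j.toNat < i.toNat := by omega
          refine ⟨i.toNat, hi', j.toNat, hlt, ?_⟩
          rcases hcast with h1 | h1
          · left; linarith
          · right; linarith
    · rintro ⟨k, hk, m, hm, heq⟩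
      refine ⟨(k : Int), ⟨Int.natCast_nonneg _, by exact_mod_cast hk⟩, (m : Int),
        ⟨Int.natCast_nonneg _, by exact_mod_cast (Nat.lt_of_lt_of_le hm (Nat.le_of_lt hk))⟩, ?_⟩
      rw [if_neg (by simp; omega)]
      rw [PySem.List.pyGetD_eq_getElem xs (i := (k : Int)) 0 (Int.natCast_nonneg _) (by exact_mod_cast hk),
          PySem.List.pyGetD_eq_getElem xs (i := (m : Int)) 0 (Int.natCast_nonneg _)
            (by exact_mod_cast Nat.lt_of_lt_of_le hm (Nat.le_of_lt hk))]
      simp only [Int.toNat_natCast]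
      apply decide_eq_true
      rw [abs_bridge]
      rcases heq with h1 | h1
      · left; linarith
      · right; linarith

-- ===== VERDICT (by name: the statement is the Claim_ definition above) =====
theorem same_diff_ints_spec : Claim_equal_same_diff_ints := by
  intro ints _
  unfold Spec_same_diff_ints
  rw [Bool.eq_iff_iff, a_true_iff, alt_true_iff]
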